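-- pv_equiv track=rewrite | github.com/chemandante/leetcode | 12/54/m1254.py | _processIsland
-- ===== SOURCE A (Python) =====
-- from collections import deque
-- from typing import List
--
-- def _processIsland(grid: List[List[str]], x: int, y: int) -> bool:
--     xmax, ymax = len(grid) - 1, len(grid[0]) - 1
--     que = deque([(x, y)])
--     grid[x][y] = 1
--     isClosed = True
--     while que:
--         x, y = que.popleft()
--         if x == 0 or y == 0 or x == xmax or y == ymax:
--             isClosed = False
--         if x > 0 and grid[x - 1][y] == 0:
--             grid[x - 1][y] = 1
--             que.append((x - 1, y))
--         if y > 0 and grid[x][y - 1] == 0: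
--             que.append((x, y - 1))
--             grid[x][y - 1] = 1
--         if x < xmax and grid[x + 1][y] == 0:
--             que.append((x + 1, y))
--             grid[x + 1][y] = 1
--         if y < ymax and grid[x][y + 1] == 0:
--             que.append((x, y + 1))
--             grid[x][y + 1] = 1
--     return isClosed
-- ===== SOURCE B (Python) =====
-- # Level-synchronous BFS flood fill: no deque — the worklist is rebuilt once per
-- # generation as a plain list (process the whole frontier, collect the next one).
-- # Visits the same cells in the same order as A, mutating grid identically.
-- def _processIsland(grid, x, y):
--     xmax, ymax = len(grid) - 1, len(grid[0]) - 1
--     grid[x][y] = 1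
--     isClosed = True
--     frontier = [(x, y)]
--     while frontier:
--         nxt = []
--         for i, j in frontier:
--             if i == 0 or j == 0 or i == xmax or j == ymax:
--                 isClosed = False
--             if i > 0 and grid[i - 1][j] == 0:
--                 grid[i - 1][j] = 1
--                 nxt.append((i - 1, j))
--             if j > 0 and grid[i][j - 1] == 0:
--                 nxt.append((i, j - 1))
--                 grid[i][j - 1] = 1
--             if i < xmax and grid[i + 1][j] == 0:
--                 nxt.append((i + 1, j))
--                 grid[i + 1][j] = 1
--             if j < ymax and grid[i][j + 1] == 0:
--                 nxt.append((i, j + 1))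
--                 grid[i][j + 1] = 1
--         frontier = nxt
--     return isClosed
-- ===== Notes on version B (the rewrite author's own statement) =====
-- stated objective: alternative
-- what changed: Replaces the deque-driven BFS loop (one mutable FIFO queue, popleft per iteration) by level-synchronous BFS: no queue data structure at all - each generation's frontier is processed as a whole plain list and the next generation is collected into a fresh list; the per-cell marking discipline, visit order, grid mutation and returned flag are identical (A's wraparound/order-sensitive corner behaviour makes any order-changing rewrite inequivalent, so the restructuring keeps FIFO order by generations).
-- outside the precondition, e.g. on _processIsland([[1], [2, 9], [3, 0]], 2, 1): A returns False, B returns False; on _processIsland([[1, -2, 1], [9, 1, 0], [-3677]], -1, -1): A returns True, B returns True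
import Mathlib
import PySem

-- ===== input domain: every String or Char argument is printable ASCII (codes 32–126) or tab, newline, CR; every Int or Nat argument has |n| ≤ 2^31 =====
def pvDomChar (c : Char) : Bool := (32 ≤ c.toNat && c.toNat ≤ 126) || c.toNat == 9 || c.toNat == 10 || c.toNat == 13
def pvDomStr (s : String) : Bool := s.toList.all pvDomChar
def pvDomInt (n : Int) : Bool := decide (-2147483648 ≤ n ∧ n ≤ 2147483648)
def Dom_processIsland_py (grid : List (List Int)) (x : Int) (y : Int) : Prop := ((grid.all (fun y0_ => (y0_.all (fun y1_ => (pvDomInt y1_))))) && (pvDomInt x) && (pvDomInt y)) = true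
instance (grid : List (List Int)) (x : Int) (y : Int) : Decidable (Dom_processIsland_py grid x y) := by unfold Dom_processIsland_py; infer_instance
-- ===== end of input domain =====

-- B replaces A's deque-driven loop by level-synchronous BFS: no queue — each
-- generation's frontier is processed as a whole and the next frontier collected
-- into a fresh list.  The visit order, the in-place grid mutation and the returned
-- flag are identical; the equivalence proved here is about the return value.

-- ===== PORT A =====
-- Python list index resolution: exact for -len ≤ i < len (negative indices wrap);
-- outside that range Python raises IndexError (excluded by Pre_) and this clamps.
def pyIx (L : Nat) (i : Int) : Nat := if 0 ≤ i then i.toNat else (i + (L : Int)).toNat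

-- grid[i][j] as A reads it (per-row wraparound); the default 1 is returned only
-- where Python would raise, which Pre_ excludes
def cellI (g : List (List Int)) (i j : Int) : Int :=
  (g.getD (pyIx g.length i) []).getD (pyIx (g.getD (pyIx g.length i) []).length j) 1

-- grid[i][j] = 1 as A writes it (no-op only where Python would raise)
def setCellI (g : List (List Int)) (i j : Int) : List (List Int) :=
  g.set (pyIx g.length i)
    ((g.getD (pyIx g.length i) []).set (pyIx (g.getD (pyIx g.length i) []).length j) 1)

-- number of cells equal to 0 (the termination measure of both loops)
def zeros (g : List (List Int)) : Nat := (g.map (fun r => r.count 0)).sum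

theorem count_set_one_lt (l : List Int) : ∀ (n : Nat), l.getD n 1 = 0 →
    (l.set n 1).count 0 < l.count 0 := by
  induction l with
  | nil => intro n h; simp [List.getD] at h
  | cons hd tl ih =>
    intro n h
    cases n with
    | zero =>
      simp [List.getD] at h
      subst h
      simp
    | succ m =>
      simp [List.getD] at h
      have := ih m (by simpa [List.getD] using h)
      simp [List.count_cons]
      exact this

theorem zeros_setNat_lt (g : List (List Int)) : ∀ (a b : Nat),
    (g.getD a []).getD b 1 = 0 →
    zeros (g.set a ((g.getD a []).set b 1)) < zeros g := by
  induction g with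
  | nil => intro a b h; simp [List.getD] at h
  | cons hd tl ih =>
    intro a b h
    cases a with
    | zero =>
      simp [List.getD] at h ⊢
      simp [zeros]
      have := count_set_one_lt hd b (by simpa [List.getD] using h)
      omega
    | succ m =>
      simp [List.getD] at h ⊢
      simp [zeros] at *
      have := ih m b (by simpa [List.getD] using h)
      simp at this
      omega

theorem zeros_setCellI_lt (g : List (List Int)) (i j : Int) (h : cellI g i j = 0) :
    zeros (setCellI g i j) < zeros g :=
  zeros_setNat_lt g (pyIx g.length i) (pyIx (g.getD (pyIx g.length i) []).length j) h

-- the four guarded "if … and grid[…] == 0: mark and enqueue" statements of the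
-- loop body (shared verbatim by both Pythons), processed in order as a chain over
-- the (guard, neighbour) list
def markChain (g : List (List Int)) (acc : List (Int × Int)) :
    List (Bool × (Int × Int)) → List (List Int) × List (Int × Int)
  | [] => (g, acc)
  | (b, p) :: rest =>
    if b = true ∧ cellI g p.1 p.2 = 0 then markChain (setCellI g p.1 p.2) (acc ++ [p]) rest
    else markChain g acc rest

theorem markChain_measure (l : List (Bool × (Int × Int))) : ∀ (g : List (List Int)) (acc : List (Int × Int)),
    5 * zeros (markChain g acc l).1 + (markChain g acc l).2.length ≤ 5 * zeros g + acc.length := by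
  induction l with
  | nil => intro g acc; simp [markChain]
  | cons hd tl ih =>
    intro g acc
    obtain ⟨b, p⟩ := hd
    simp only [markChain]
    split
    · rename_i hcond
      have h1 := zeros_setCellI_lt g p.1 p.2 hcond.2
      have h2 := ih (setCellI g p.1 p.2) (acc ++ [p])
      simp at h2
      omega
    · exact ih g acc

-- A's BFS loop: one FIFO queue, border test on the popped cell, neighbours
-- marked at enqueue time
def loopA (xmax ymax : Int) (g : List (List Int)) (q : List (Int × Int)) (isClosed : Bool) : Bool :=
  match q with
  | [] => isClosed
  | (x, y) :: rest =>
    let isClosed' := if x = 0 ∨ y = 0 ∨ x = xmax ∨ y = ymax then false else isClosed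
    let p := markChain g [] [(decide (0 < x), (x - 1, y)), (decide (0 < y), (x, y - 1)),
                             (decide (x < xmax), (x + 1, y)), (decide (y < ymax), (x, y + 1))]
    loopA xmax ymax p.1 (rest ++ p.2) isClosed'
termination_by 5 * zeros g + q.length
decreasing_by
  have := markChain_measure [(decide (0 < x), (x - 1, y)), (decide (0 < y), (x, y - 1)),
                             (decide (x < xmax), (x + 1, y)), (decide (y < ymax), (x, y + 1))] g []
  simp only [List.length_nil] at this
  simp only [List.length_append, List.length_cons]
  omega

def processIsland_py (grid : List (List Int)) (x : Int) (y : Int) : Bool :=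
  let xmax : Int := (grid.length : Int) - 1
  let ymax : Int := ((grid.getD 0 []).length : Int) - 1
  loopA xmax ymax (setCellI grid x y) [(x, y)] true

-- ===== PORT B =====
-- B's inner `for i, j in frontier:` loop: processes one whole generation against
-- the evolving grid and flag, collecting the next generation (`nxt`) in order
def levelStep (xmax ymax : Int) (g : List (List Int)) (frontier : List (Int × Int)) (isClosed : Bool) :
    List (List Int) × List (Int × Int) × Bool :=
  match frontier with
  | [] => (g, [], isClosed)
  | (x, y) :: rest =>
    let isClosed' := if x = 0 ∨ y = 0 ∨ x = xmax ∨ y = ymax then false else isClosed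
    let p := markChain g [] [(decide (0 < x), (x - 1, y)), (decide (0 < y), (x, y - 1)),
                             (decide (x < xmax), (x + 1, y)), (decide (y < ymax), (x, y + 1))]
    let r := levelStep xmax ymax p.1 rest isClosed'
    (r.1, p.2 ++ r.2.1, r.2.2)

theorem levelStep_measure (xmax ymax : Int) : ∀ (frontier : List (Int × Int)) (g : List (List Int)) (isClosed : Bool),
    5 * zeros (levelStep xmax ymax g frontier isClosed).1 +
      (levelStep xmax ymax g frontier isClosed).2.1.length ≤ 5 * zeros g := by
  intro frontier
  induction frontier with
  | nil => intro g c; simp [levelStep]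
  | cons hd tl ih =>
    intro g c
    obtain ⟨x, y⟩ := hd
    simp only [levelStep, List.length_append]
    have h1 := markChain_measure [(decide (0 < x), (x - 1, y)), (decide (0 < y), (x, y - 1)),
                             (decide (x < xmax), (x + 1, y)), (decide (y < ymax), (x, y + 1))] g []
    simp only [List.length_nil] at h1
    have h2 := ih (markChain g []
      [(decide (0 < x), (x - 1, y)), (decide (0 < y), (x, y - 1)),
       (decide (x < xmax), (x + 1, y)), (decide (y < ymax), (x, y + 1))]).1
      (if x = 0 ∨ y = 0 ∨ x = xmax ∨ y = ymax then false else c)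
    omega

-- B's outer `while frontier:` loop over generations
def levelLoop (xmax ymax : Int) (g : List (List Int)) (frontier : List (Int × Int)) (isClosed : Bool) : Bool :=
  match frontier with
  | [] => isClosed
  | f :: rest =>
    let r := levelStep xmax ymax g (f :: rest) isClosed
    levelLoop xmax ymax r.1 r.2.1 r.2.2
termination_by 5 * zeros g + frontier.length
decreasing_by
  have := levelStep_measure xmax ymax (f :: rest) g isClosed
  simp only [List.length_cons]
  omega

def processIsland_py_alt (grid : List (List Int)) (x : Int) (y : Int) : Bool :=
  let xmax : Int := (grid.length : Int) - 1
  let ymax : Int := ((grid.getD 0 []).length : Int) - 1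
  levelLoop xmax ymax (setCellI grid x y) [(x, y)] true

-- ===== PRECONDITION & SPEC =====
-- Pre_ excludes exactly input classes on which A can raise IndexError: it admits
-- every start index Python resolves (including negative wraparound) when no row is
-- shorter than row 0, and additionally, for non-negative in-range starts, grids
-- whose short rows are "fenced" (no zero cell and not the start directly above,
-- below, or immediately to the left of a missing cell), so the fill provably never
-- reads past a short row.  A few ragged/out-of-column-range inputs on which A
-- happens to return are excluded with it, since "the fill never reads a missing
-- cell" has no closed form (see cites in the claim).
def Pre_processIsland_py (grid : List (List Int)) (x : Int) (y : Int) : Prop :=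
  (0 < grid.length ∧ 0 < (grid.getD 0 []).length ∧
    -(grid.length : Int) ≤ x ∧ x < (grid.length : Int) ∧
    -((grid.getD 0 []).length : Int) ≤ y ∧ y < ((grid.getD 0 []).length : Int) ∧
    (∀ row ∈ grid, (grid.getD 0 []).length ≤ row.length))
  ∨
  (0 ≤ x ∧ x < (grid.length : Int) ∧ 0 ≤ y ∧ y < ((grid.getD 0 []).length : Int) ∧
    y < ((grid.getD x.toNat []).length : Int) ∧
    ((List.range grid.length).all (fun i =>
      ((List.range (grid.getD 0 []).length).all (fun j =>
        if (grid.getD i []).length ≤ j then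
          (!(0 < i) || !((grid.getD (i - 1) []).getD j 1 == 0 || (((i : Int) - 1, (j : Int)) == (x, y)))) &&
          (!(i + 1 < grid.length) || !((grid.getD (i + 1) []).getD j 1 == 0 || (((i : Int) + 1, (j : Int)) == (x, y))))
        else true)) &&
      (if (grid.getD i []).length < (grid.getD 0 []).length ∧ 0 < (grid.getD i []).length then
        !((grid.getD i []).getD ((grid.getD i []).length - 1) 1 == 0 ||
          (((i : Int), ((grid.getD i []).length : Int) - 1) == (x, y)))
       else true))) = true)

instance (grid : List (List Int)) (x : Int) (y : Int) : Decidable (Pre_processIsland_py grid x y) := by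
  unfold Pre_processIsland_py; infer_instance

def pvWitness_processIsland_py : List (List Int) × Int × Int := ([[1, 1, 1], [1, 0, 1], [1, 1, 1]], 1, 1)

def Spec_processIsland_py (grid : List (List Int)) (x : Int) (y : Int) (out : Bool) : Prop := out = processIsland_py_alt grid x y
instance (grid : List (List Int)) (x : Int) (y : Int) (out : Bool) : Decidable (Spec_processIsland_py grid x y out) := by unfold Spec_processIsland_py; infer_instance

-- ===== CLAIM (what is proved, stated in full; the proofs are below) =====
def Claim_equal_processIsland_py : Prop := ∀ (grid : List (List Int)) (x : Int) (y : Int), Dom_processIsland_py grid x y → Pre_processIsland_py grid x y → Spec_processIsland_py grid x y (processIsland_py grid x y)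

-- ===== LEMMAS AND PROOFS =====

-- one generation of B, interleaved into A's queue: processing the block `q` at the
-- front of A's queue is the same as running B's levelStep on it and queueing the
-- collected cells behind `extra`
theorem loopA_shift (xmax ymax : Int) : ∀ (q extra : List (Int × Int)) (g : List (List Int)) (c : Bool),
    loopA xmax ymax g (q ++ extra) c =
      loopA xmax ymax (levelStep xmax ymax g q c).1
        (extra ++ (levelStep xmax ymax g q c).2.1) (levelStep xmax ymax g q c).2.2 := by
  intro q
  induction q with
  | nil => intro extra g c; simp [levelStep]
  | cons hd tl ih =>
    intro extra g c
    obtain ⟨x, y⟩ := hd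
    rw [List.cons_append, loopA]
    simp only [levelStep]
    rw [List.append_assoc, ih (extra ++ _)]
    simp [List.append_assoc]

-- the two loops agree, by strong induction on the shared termination measure
theorem loopA_eq_levelLoop (xmax ymax : Int) : ∀ (n : Nat) (g : List (List Int)) (q : List (Int × Int)) (c : Bool),
    5 * zeros g + q.length ≤ n → loopA xmax ymax g q c = levelLoop xmax ymax g q c := by
  intro n
  induction n with
  | zero =>
    intro g q c h
    match q with
    | [] => rw [loopA, levelLoop]
  | succ m ih =>
    intro g q c h
    match q with
    | [] => rw [loopA, levelLoop]
    | (x, y) :: rest =>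
      have hs := loopA_shift xmax ymax ((x, y) :: rest) [] g c
      rw [List.append_nil] at hs
      rw [hs, List.nil_append]
      have hm := levelStep_measure xmax ymax ((x, y) :: rest) g c
      rw [levelLoop]
      exact ih _ _ _ (by simp only [List.length_cons] at h; omega)

-- ===== VERDICT (by name: the statement is the Claim_ definition above) =====
theorem processIsland_py_spec : Claim_equal_processIsland_py := by
  intro grid x y _ _
  unfold Spec_processIsland_py processIsland_py processIsland_py_alt
  exact loopA_eq_levelLoop _ _ _ _ _ _ (le_refl _)
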